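-- pv_equiv track=rewrite | github.com/wtyler2505/pdanet-linux | pdanet_ai/api/advanced_nlp_interface.py | _simplify_technical_language
-- ===== SOURCE A (Python) =====
-- def _simplify_technical_language(text: str) -> str:
--     """Simplify technical language in response"""
--     technical_replacements = {
--         'bandwidth allocation': 'internet speed sharing',
--         'latency optimization': 'reducing delays',
--         'packet loss': 'connection reliability',
--         'QoS configuration': 'quality settings',
--         'traffic shaping': 'speed management'
--     }
--
--     for technical, simple in technical_replacements.items():
--         text = text.replace(technical, simple)
--
--     return text
-- ===== SOURCE B (Python) =====
-- _REPLACEMENTS = {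
--     'bandwidth allocation': 'internet speed sharing',
--     'latency optimization': 'reducing delays',
--     'packet loss': 'connection reliability',
--     'QoS configuration': 'quality settings',
--     'traffic shaping': 'speed management',
-- }
--
--
-- def _simplify_technical_language(text: str) -> str:
--     """Simplify technical language in response (single left-to-right pass)."""
--     out = []
--     i = 0
--     n = len(text)
--     while i < n:
--         for technical, simple in _REPLACEMENTS.items():
--             if text.startswith(technical, i):
--                 out.append(simple)
--                 i += len(technical)
--                 break
--         else:
--             out.append(text[i])
--             i += 1
--     return ''.join(out)
-- ===== Notes on version B (the rewrite author's own statement) =====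
-- stated objective: alternative
-- what changed: Replaces five sequential full-string str.replace scans by a single left-to-right pass that at each position matches any of the five phrases and emits its replacement (one traversal, no intermediate strings); equal because the phrases are mutually non-overlapping and no replacement text touches any phrase.
import Mathlib
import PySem

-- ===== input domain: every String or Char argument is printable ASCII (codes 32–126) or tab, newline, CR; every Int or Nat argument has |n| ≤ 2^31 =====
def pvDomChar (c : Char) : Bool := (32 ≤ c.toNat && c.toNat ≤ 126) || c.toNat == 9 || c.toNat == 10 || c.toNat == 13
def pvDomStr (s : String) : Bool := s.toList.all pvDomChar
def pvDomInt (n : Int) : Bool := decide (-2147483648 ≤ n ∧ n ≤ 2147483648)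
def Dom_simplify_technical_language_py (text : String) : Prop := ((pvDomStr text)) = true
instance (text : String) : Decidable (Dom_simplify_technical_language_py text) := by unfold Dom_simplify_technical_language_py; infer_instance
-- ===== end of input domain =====

-- B replaces A's five sequential full-string str.replace scans by ONE left-to-right pass that
-- matches any of the five phrases at each position; equal because the phrases are mutually
-- non-overlapping and no replacement text contains or abuts a phrase (proved below).

-- ===== PORT A =====
-- the dict literal of A, as an association list in insertion order
def pvReplacementsA : List (String × String) :=
  [("bandwidth allocation", "internet speed sharing"),
   ("latency optimization", "reducing delays"),
   ("packet loss", "connection reliability"),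
   ("QoS configuration", "quality settings"),
   ("traffic shaping", "speed management")]

-- for technical, simple in d.items(): text = text.replace(technical, simple)
def simplify_technical_language_py (text : String) : String :=
  pvReplacementsA.foldl (fun t kv => PySem.Str.replace t kv.1 kv.2) text

-- ===== PORT B =====
-- the same dict, over char lists (B scans the text once, character by character)
def pvRules : List (List Char × List Char) :=
  [("bandwidth allocation".toList, "internet speed sharing".toList),
   ("latency optimization".toList, "reducing delays".toList),
   ("packet loss".toList, "connection reliability".toList),
   ("QoS configuration".toList, "quality settings".toList),
   ("traffic shaping".toList, "speed management".toList)]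

-- the for/else over the dict items: first rule whose key starts at the current position
def pvFindRule (L : List (List Char × List Char)) (s : List Char) :
    Option (List Char × List Char) :=
  L.find? (fun kv => kv.1.isPrefixOf s)

-- the while-loop of B: one pass, emitting the replacement (and skipping the key) on a match,
-- else emitting the current character (output built by appending pieces, as B's ''.join does)
def pvScan (L : List (List Char × List Char)) : List Char → List Char
  | [] => []
  | c :: t =>
    match pvFindRule L (c :: t) with
    | some kv => kv.2 ++ pvScan L (t.drop (kv.1.length - 1))
    | none => c :: pvScan L t
termination_by s => s.length
decreasing_by
  · simp only [List.length_cons, List.length_drop]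
    omega
  · simp

def simplify_technical_language_py_alt (text : String) : String :=
  String.ofList (pvScan pvRules text.toList)

-- ===== PRECONDITION & SPEC =====
def Spec_simplify_technical_language_py (text : String) (out : String) : Prop := out = simplify_technical_language_py_alt text
instance (text : String) (out : String) : Decidable (Spec_simplify_technical_language_py text out) := by unfold Spec_simplify_technical_language_py; infer_instance

-- ===== CLAIM (what is proved, stated in full; the proofs are below) =====
def Claim_equal_simplify_technical_language_py : Prop := ∀ (text : String), Dom_simplify_technical_language_py text → Spec_simplify_technical_language_py text (simplify_technical_language_py text)

-- ===== LEMMAS AND PROOFS =====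

-- a prefix of an append is a prefix of the left part, or extends it
lemma pv_prefix_split {a b c : List Char} (h : a <+: b ++ c) : a <+: b ∨ b <+: a := by
  by_cases hl : a.length ≤ b.length
  · exact Or.inl (List.prefix_of_prefix_length_le h (List.prefix_append b c) hl)
  · exact Or.inr (List.prefix_of_prefix_length_le (List.prefix_append b c) h (by omega))

-- pvScan with no rules is the identity
lemma pvScan_nil : ∀ l, pvScan [] l = l := by
  intro l
  induction l with
  | nil => simp [pvScan]
  | cons c t ih => simp [pvScan, pvFindRule, ih]

-- PySem.Chars.replace.go is B's one-rule scanner (fuel ≥ remaining length)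
lemma pv_go_spec (old new : List Char) (hold : old ≠ []) :
    ∀ fuel l acc, l.length ≤ fuel →
      PySem.Chars.replace.go old new fuel l acc = acc.reverse ++ pvScan [(old, new)] l := by
  intro fuel
  induction fuel with
  | zero =>
    intro l acc hl
    have : l = [] := by cases l <;> simp_all
    subst this
    simp [PySem.Chars.replace.go, pvScan]
  | succ fuel ih =>
    intro l acc hl
    cases l with
    | nil => simp [PySem.Chars.replace.go, pvScan]
    | cons c t =>
      have hlen : 1 ≤ old.length := by cases old <;> simp_all
      by_cases hp : old.isPrefixOf (c :: t)
      · have hdrop : List.drop old.length (c :: t) = t.drop (old.length - 1) := by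
          obtain ⟨o, os, rfl⟩ : ∃ o os, old = o :: os := by
            cases old with
            | nil => exact absurd rfl hold
            | cons o os => exact ⟨o, os, rfl⟩
          simp [List.drop_succ_cons]
        have hle : (List.drop old.length (c :: t)).length ≤ fuel := by
          rw [List.length_drop]
          simp only [List.length_cons] at hl ⊢
          omega
        rw [show PySem.Chars.replace.go old new (fuel + 1) (c :: t) acc
              = PySem.Chars.replace.go old new fuel (List.drop old.length (c :: t))
                  (new.reverse ++ acc) by
              simp [PySem.Chars.replace.go, hp]]
        rw [ih _ _ hle, hdrop]
        have hsc : pvScan [(old, new)] (c :: t)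
            = new ++ pvScan [(old, new)] (t.drop (old.length - 1)) := by
          rw [pvScan]
          simp [pvFindRule, List.find?, hp]
        rw [hsc]
        simp
      · have hle : t.length ≤ fuel := by simp at hl; omega
        rw [show PySem.Chars.replace.go old new (fuel + 1) (c :: t) acc
              = PySem.Chars.replace.go old new fuel t (c :: acc) by
              simp [PySem.Chars.replace.go, hp]]
        rw [ih _ _ hle]
        have hsc : pvScan [(old, new)] (c :: t) = c :: pvScan [(old, new)] t := by
          rw [pvScan]
          simp [pvFindRule, List.find?, hp]
        rw [hsc]
        simp

-- Python's str.replace IS the one-rule scanner (for a nonempty pattern)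
lemma pv_replace_eq_scanOne (s old new : List Char) (h : old ≠ []) :
    PySem.Chars.replace s old new = pvScan [(old, new)] s := by
  have : old.isEmpty = false := by cases old <;> simp_all
  rw [PySem.Chars.replace, this]
  simpa using pv_go_spec old new h s.length s [] le_rfl

-- the scanner walks unchanged through a region where no rule matches
lemma pv_scan_pass (L : List (List Char × List Char)) :
    ∀ pre rest, (∀ p, p < pre.length → pvFindRule L (pre.drop p ++ rest) = none) →
      pvScan L (pre ++ rest) = pre ++ pvScan L rest := by
  intro pre
  induction pre with
  | nil => intro rest _; simp
  | cons c pr ih =>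
    intro rest h
    have h0 : pvFindRule L (c :: (pr ++ rest)) = none := by
      have := h 0 (by simp)
      simpa using this
    rw [List.cons_append, pvScan, h0,
      ih rest (fun p hp => by simpa using h (p + 1) (by simpa using Nat.succ_lt_succ hp))]
    rfl

-- if no nonempty suffix of `key` touches any replacement text, a suffix of `key` that
-- prefixes the scanner's output already prefixed its input
lemma pv_scan_suffix_reflect (L : List (List Char × List Char)) (key : List Char)
    (H : ∀ u, u ≠ [] → u <:+ key → ∀ kv ∈ L, ¬ u <+: kv.2 ∧ ¬ kv.2 <+: u) :
    ∀ t w, w ≠ [] → w <:+ key → w <+: pvScan L t → w <+: t := by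
  intro t
  induction t using pvScan.induct L with
  | case1 =>
    intro w hne _ hp
    simp [pvScan] at hp
    exact absurd hp hne
  | case2 c t kv hfind ih =>
    intro w hne hsuf hp
    rw [pvScan, hfind] at hp
    rcases pv_prefix_split hp with h | h
    · exact absurd h (H w hne hsuf kv (List.mem_of_find?_eq_some hfind)).1
    · exact absurd h (H w hne hsuf kv (List.mem_of_find?_eq_some hfind)).2
  | case3 c t hfind ih =>
    intro w hne hsuf hp
    rw [pvScan, hfind] at hp
    cases w with
    | nil => exact absurd rfl hne
    | cons a w' =>
      rw [List.cons_prefix_cons] at hp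
      obtain ⟨rfl, hp'⟩ := hp
      rcases eq_or_ne w' [] with rfl | hne'
      · simp
      · have hsuf' : w' <:+ key := (List.suffix_cons a w').trans hsuf
        exact List.cons_prefix_cons.mpr ⟨rfl, ih w' hne' hsuf' hp'⟩

-- THE STEP: running one more sequential replace over the scanner's output extends the rule set
lemma pv_step (L : List (List Char × List Char)) (k v : List Char)
    (hk : k ≠ [])
    (H1 : ∀ kv ∈ L, ∀ u, u ≠ [] → u <:+ kv.2 → ¬ k <+: u ∧ ¬ u <+: k)
    (H2 : ∀ u, u ≠ [] → u ≠ k → u <:+ k → ∀ kv ∈ L, ¬ kv.1 <+: u ∧ ¬ u <+: kv.1)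
    (H3 : ∀ u, u ≠ [] → u ≠ k → u <:+ k → ∀ kv ∈ L, ¬ u <+: kv.2 ∧ ¬ kv.2 <+: u) :
    ∀ n s, s.length ≤ n → pvScan [(k, v)] (pvScan L s) = pvScan (L ++ [(k, v)]) s := by
  intro n
  induction n with
  | zero =>
    intro s hs
    have : s = [] := by cases s <;> simp_all
    subst this; simp [pvScan]
  | succ n ih =>
    intro s hs
    cases s with
    | nil => simp [pvScan]
    | cons c t =>
      simp only [List.length_cons] at hs
      cases hfind : pvFindRule L (c :: t) with
      | some kv =>
        -- a rule of L fires: its replacement passes untouched through the extra rule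
        have hmem := List.mem_of_find?_eq_some hfind
        have hdlen : (t.drop (kv.1.length - 1)).length ≤ n := by
          rw [List.length_drop]; omega
        have hpass : ∀ p, p < kv.2.length →
            pvFindRule [(k, v)] (kv.2.drop p ++ pvScan L (t.drop (kv.1.length - 1))) = none := by
          intro p hp
          have hu : kv.2.drop p ≠ [] := by
            intro h
            have : (kv.2.drop p).length = 0 := by rw [h]; rfl
            rw [List.length_drop] at this
            omega
          rw [pvFindRule, List.find?_eq_none]
          intro x hx hpre
          simp only [List.mem_singleton] at hx
          subst hx
          rw [List.isPrefixOf_iff_prefix] at hpre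
          rcases pv_prefix_split hpre with h | h
          · exact (H1 kv hmem (kv.2.drop p) hu (List.drop_suffix p kv.2)).1 h
          · exact (H1 kv hmem (kv.2.drop p) hu (List.drop_suffix p kv.2)).2 h
        have hfind' : pvFindRule (L ++ [(k, v)]) (c :: t) = some kv := by
          rw [pvFindRule, List.find?_append]
          rw [pvFindRule] at hfind
          rw [hfind]; rfl
        rw [pvScan, hfind, pv_scan_pass _ _ _ hpass, pvScan, hfind', ih _ hdlen]
      | none =>
        by_cases hkp : k <+: c :: t
        · -- the new rule fires here
          obtain ⟨d, k', rfl⟩ : ∃ d k', k = d :: k' := by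
            cases k with
            | nil => exact absurd rfl hk
            | cons d k' => exact ⟨d, k', rfl⟩
          rw [List.cons_prefix_cons] at hkp
          obtain ⟨heq, hk't⟩ := hkp
          subst heq
          obtain ⟨rest, rfl⟩ := hk't
          have hrlen : rest.length ≤ n := by
            have : (k' ++ rest).length = k'.length + rest.length := by simp
            omega
          -- no rule of L matches anywhere inside the k' region
          have hpass : ∀ p, p < k'.length → pvFindRule L (k'.drop p ++ rest) = none := by
            intro p hp
            rw [pvFindRule, List.find?_eq_none]
            intro kv hmem hpre
            rw [List.isPrefixOf_iff_prefix] at hpre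
            have hu : k'.drop p ≠ [] := by
              intro h
              have : (k'.drop p).length = 0 := by rw [h]; rfl
              rw [List.length_drop] at this
              omega
            have husuf : k'.drop p <:+ d :: k' :=
              (List.drop_suffix p k').trans (List.suffix_cons d k')
            have hune : k'.drop p ≠ d :: k' := by
              intro h
              have : (k'.drop p).length = (d :: k').length := by rw [h]
              rw [List.length_drop] at this
              simp only [List.length_cons] at this
              omega
            rcases pv_prefix_split hpre with h | h
            · exact (H2 (k'.drop p) hu hune husuf kv hmem).1 h
            · exact (H2 (k'.drop p) hu hune husuf kv hmem).2 h
          have hscan : pvScan L (k' ++ rest) = k' ++ pvScan L rest := pv_scan_pass L k' rest hpass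
          have hb : (d :: k').isPrefixOf (d :: (k' ++ pvScan L rest)) = true := by
            rw [List.isPrefixOf_iff_prefix, List.cons_prefix_cons]
            exact ⟨rfl, List.prefix_append _ _⟩
          have hb2 : (d :: k').isPrefixOf (d :: (k' ++ rest)) = true := by
            rw [List.isPrefixOf_iff_prefix, List.cons_prefix_cons]
            exact ⟨rfl, List.prefix_append _ _⟩
          have hfind1 : pvFindRule [(d :: k', v)] (d :: (k' ++ pvScan L rest)) = some (d :: k', v) := by
            simp [pvFindRule, List.find?, hb]
          have hfind2 : pvFindRule (L ++ [(d :: k', v)]) (d :: (k' ++ rest)) = some (d :: k', v) := by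
            rw [pvFindRule, List.find?_append]
            rw [pvFindRule] at hfind
            rw [hfind]
            simp [List.find?, hb2]
          rw [pvScan, hfind, hscan, pvScan, hfind1, pvScan, hfind2]
          simp only [List.length_cons, Nat.add_sub_cancel, List.drop_left]
          rw [ih _ hrlen]
        · -- no rule fires: one literal character
          have hfind1 : pvFindRule [(k, v)] (c :: pvScan L t) = none := by
            rw [pvFindRule, List.find?_eq_none]
            intro kv hmem hpre
            simp only [List.mem_singleton] at hmem
            subst hmem
            rw [List.isPrefixOf_iff_prefix] at hpre
            obtain ⟨d, k', rfl⟩ : ∃ d k', k = d :: k' := by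
              cases k with
              | nil => exact absurd rfl hk
              | cons d k' => exact ⟨d, k', rfl⟩
            rw [List.cons_prefix_cons] at hpre
            obtain ⟨heq, hp'⟩ := hpre
            subst heq
            rcases eq_or_ne k' [] with rfl | hk'ne
            · exact hkp (by simp)
            · have hrefl := pv_scan_suffix_reflect L k'
                (fun u hu husuf kv hkv =>
                  H3 u hu
                    (by intro h
                        have h1 := husuf.length_le
                        have h2 : u.length = (d :: k').length := by rw [h]
                        simp only [List.length_cons] at h2
                        omega)
                    (husuf.trans (List.suffix_cons d k')) kv hkv)
                t k' hk'ne List.suffix_rfl hp'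
              exact hkp (List.cons_prefix_cons.mpr ⟨rfl, hrefl⟩)
          have hfind2 : pvFindRule (L ++ [(k, v)]) (c :: t) = none := by
            rw [pvFindRule, List.find?_append]
            rw [pvFindRule] at hfind
            rw [hfind]
            have hb : k.isPrefixOf (c :: t) = false := by
              rw [← Bool.not_eq_true, List.isPrefixOf_iff_prefix]
              exact hkp
            simp [List.find?, hb]
          rw [pvScan, hfind, pvScan, hfind1, pvScan, hfind2, ih _ (by omega)]

-- bridge: a ∀-over-suffixes hypothesis from a decidable ∀-over-tails check
lemma pv_tails_bridge {x : List Char} {P : List Char → Prop}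
    (h : ∀ u ∈ x.tails, P u) : ∀ u, u <:+ x → P u :=
  fun u hu => h u ((List.mem_tails u x).mpr hu)

-- one sequential replace over scanner output, hypotheses discharged by computation
lemma pv_step_concrete (L : List (List Char × List Char)) (k v : List Char)
    (hk : k ≠ [])
    (h1 : ∀ kv ∈ L, ∀ u ∈ kv.2.tails, u ≠ [] → ¬ k <+: u ∧ ¬ u <+: k)
    (h23 : ∀ u ∈ k.tails, u ≠ [] → u ≠ k →
      ∀ kv ∈ L, (¬ kv.1 <+: u ∧ ¬ u <+: kv.1) ∧ (¬ u <+: kv.2 ∧ ¬ kv.2 <+: u))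
    (s : List Char) :
    pvScan [(k, v)] (pvScan L s) = pvScan (L ++ [(k, v)]) s :=
  pv_step L k v hk
    (fun kv hkv u hu hsuf => pv_tails_bridge (fun x hx hxne => h1 kv hkv x hx hxne) u hsuf hu)
    (fun u hu hne hsuf kv hkv =>
      (pv_tails_bridge (fun x hx hxne hxk kv' hkv' => h23 x hx hxne hxk kv' hkv') u hsuf hu hne kv hkv).1)
    (fun u hu hne hsuf kv hkv =>
      (pv_tails_bridge (fun x hx hxne hxk kv' hkv' => h23 x hx hxne hxk kv' hkv') u hsuf hu hne kv hkv).2)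
    s.length s le_rfl

-- ===== VERDICT (by name: the statement is the Claim_ definition above) =====
theorem simplify_technical_language_py_spec : Claim_equal_simplify_technical_language_py := by
  intro text _
  show simplify_technical_language_py text = simplify_technical_language_py_alt text
  rw [simplify_technical_language_py, simplify_technical_language_py_alt]
  simp only [pvReplacementsA, List.foldl, PySem.Str.replace, String.toList_ofList]
  rw [pv_replace_eq_scanOne _ _ _ (by decide),
      pv_replace_eq_scanOne _ _ _ (by decide),
      pv_replace_eq_scanOne _ _ _ (by decide),
      pv_replace_eq_scanOne _ _ _ (by decide),
      pv_replace_eq_scanOne _ _ _ (by decide)]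
  rw [show pvScan [("bandwidth allocation".toList, "internet speed sharing".toList)] text.toList
        = pvScan [("bandwidth allocation".toList, "internet speed sharing".toList)]
            (pvScan [] text.toList) by rw [pvScan_nil]]
  rw [pv_step_concrete [] "bandwidth allocation".toList "internet speed sharing".toList (by decide) (by decide) (by decide)]
  rw [pv_step_concrete ([] ++ [("bandwidth allocation".toList, "internet speed sharing".toList)]) "latency optimization".toList "reducing delays".toList (by decide) (by decide) (by decide)]
  rw [pv_step_concrete (([] ++ [("bandwidth allocation".toList, "internet speed sharing".toList)]) ++ [("latency optimization".toList, "reducing delays".toList)]) "packet loss".toList "connection reliability".toList (by decide) (by decide) (by decide)]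
  rw [pv_step_concrete ((([] ++ [("bandwidth allocation".toList, "internet speed sharing".toList)]) ++ [("latency optimization".toList, "reducing delays".toList)]) ++ [("packet loss".toList, "connection reliability".toList)]) "QoS configuration".toList "quality settings".toList (by decide) (by decide) (by decide)]
  rw [pv_step_concrete (((([] ++ [("bandwidth allocation".toList, "internet speed sharing".toList)]) ++ [("latency optimization".toList, "reducing delays".toList)]) ++ [("packet loss".toList, "connection reliability".toList)]) ++ [("QoS configuration".toList, "quality settings".toList)]) "traffic shaping".toList "speed management".toList (by decide) (by decide) (by decide)]
  rfl
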